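-- pv_equiv track=rewrite | github.com/Ak476024/DSA | ProblemSolving/P03.py | buildPatter
-- ===== SOURCE A (Python) =====
-- def buildPatter(number):
--   outputArray=[]
--   for row in range(number+1)[1:]:
--     colArray=[]
--     for column in range(row+1)[1:]:
--        colArray.append(column)
--     outputArray.append(colArray)
--   return outputArray
-- ===== SOURCE B (Python) =====
-- def buildPatter(number):
--   out = []
--   prev = []
--   for row in range(1, number + 1):
--     cur = prev + [row]
--     out.append(cur)
--     prev = cur
--   return out
-- ===== Notes on version B (the rewrite author's own statement) =====
-- stated objective: alternative
-- what changed: Each row is derived incrementally from the previous row (cur = prev + [row]) via a running accumulator, removing A's inner loop that re-enumerates 1..row for every row.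
import Mathlib
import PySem

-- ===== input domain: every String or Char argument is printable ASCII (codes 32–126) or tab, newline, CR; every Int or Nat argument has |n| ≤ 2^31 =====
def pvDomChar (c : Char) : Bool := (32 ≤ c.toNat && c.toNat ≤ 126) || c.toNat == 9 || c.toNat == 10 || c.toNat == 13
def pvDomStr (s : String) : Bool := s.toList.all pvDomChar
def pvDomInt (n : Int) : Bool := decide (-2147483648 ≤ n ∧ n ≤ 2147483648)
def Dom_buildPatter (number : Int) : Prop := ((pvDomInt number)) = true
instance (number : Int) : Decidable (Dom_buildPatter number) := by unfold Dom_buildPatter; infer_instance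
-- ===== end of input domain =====

-- B builds each row incrementally from the previous one (cur = prev ++ [row]), removing A's inner loop; return value equality only.

-- ===== PORT A =====
-- for row in range(number+1)[1:]: inner loop appends each column 1..row into a fresh colArray
def buildPatter (number : Int) : List (List Int) :=
  (PySem.List.slice (PySem.List.pyRange 0 (number + 1) 1) (some 1) none).foldl
    (fun outputArray row =>
      outputArray ++
        [(PySem.List.slice (PySem.List.pyRange 0 (row + 1) 1) (some 1) none).foldl
            (fun colArray column => colArray ++ [column]) []])
    []

-- ===== PORT B =====
-- running accumulator: prev holds the previous row, cur = prev ++ [row]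
def buildPatterGo (rows : List Int) (prev : List Int) (out : List (List Int)) : List (List Int) :=
  match rows with
  | [] => out
  | row :: rest =>
    let cur := prev ++ [row]
    buildPatterGo rest cur (out ++ [cur])

def buildPatter_alt (number : Int) : List (List Int) :=
  buildPatterGo (PySem.List.pyRange 1 (number + 1) 1) [] []

-- ===== PRECONDITION & SPEC =====
def Spec_buildPatter (number : Int) (out : List (List Int)) : Prop := out = buildPatter_alt number
instance (number : Int) (out : List (List Int)) : Decidable (Spec_buildPatter number out) := by unfold Spec_buildPatter; infer_instance

-- ===== CLAIM =====
def Claim_equal_buildPatter : Prop := ∀ (number : Int), Dom_buildPatter number → Spec_buildPatter number (buildPatter number)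

-- ===== LEMMAS AND PROOFS =====

theorem pv_foldl_append_singleton {α : Type} (l : List α) (acc : List α) :
    l.foldl (fun a x => a ++ [x]) acc = acc ++ l := by
  induction l generalizing acc with
  | nil => simp
  | cons x xs ih => simp [List.foldl, ih]

theorem pv_slice_tail_range (m : Int) :
    PySem.List.slice (PySem.List.pyRange 0 m 1) (some 1) none = PySem.List.pyRange 1 m 1 := by
  rw [PySem.List.slice_from_one]
  by_cases h : m ≤ 0
  · rw [PySem.List.pyRange_one_eq_nil h, PySem.List.pyRange_one_eq_nil (by omega)]
    rfl
  · rw [PySem.List.pyRange_one_cons (by omega)]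
    rfl

theorem pv_A_eq_map (number : Int) :
    buildPatter number
      = (PySem.List.pyRange 1 (number + 1) 1).map (fun r => PySem.List.pyRange 1 (r + 1) 1) := by
  unfold buildPatter
  rw [pv_slice_tail_range]
  have hinner : ∀ (r : Int),
      (PySem.List.slice (PySem.List.pyRange 0 (r + 1) 1) (some 1) none).foldl
        (fun colArray column => colArray ++ [column]) [] = PySem.List.pyRange 1 (r + 1) 1 := by
    intro r
    rw [pv_slice_tail_range, pv_foldl_append_singleton]
    rfl
  have : ∀ (l : List Int) (acc : List (List Int)),
      l.foldl (fun outputArray row =>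
        outputArray ++
          [(PySem.List.slice (PySem.List.pyRange 0 (row + 1) 1) (some 1) none).foldl
              (fun colArray column => colArray ++ [column]) []]) acc
        = acc ++ l.map (fun r => PySem.List.pyRange 1 (r + 1) 1) := by
    intro l
    induction l with
    | nil => simp
    | cons x xs ih =>
      intro acc
      rw [List.foldl_cons, ih, hinner x]
      simp
  simpa using this (PySem.List.pyRange 1 (number + 1) 1) []

theorem pv_go_eq_map (a b : Int) (ha : 1 ≤ a) (out : List (List Int)) :
    buildPatterGo (PySem.List.pyRange a b 1) (PySem.List.pyRange 1 a 1) out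
      = out ++ (PySem.List.pyRange a b 1).map (fun r => PySem.List.pyRange 1 (r + 1) 1) := by
  by_cases h : b ≤ a
  · rw [PySem.List.pyRange_one_eq_nil h]; simp [buildPatterGo]
  · have hlt : a < b := by omega
    have hstep : PySem.List.pyRange 1 a 1 ++ [a] = PySem.List.pyRange 1 (a + 1) 1 :=
      (PySem.List.pyRange_one_succ_right ha).symm
    rw [PySem.List.pyRange_one_cons hlt]
    simp only [buildPatterGo, List.map_cons]
    rw [hstep, pv_go_eq_map (a + 1) b (by omega)]
    simp
termination_by (b - a).toNat
decreasing_by omega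

-- ===== VERDICT =====
theorem buildPatter_spec : Claim_equal_buildPatter := by
  intro number _
  unfold Spec_buildPatter buildPatter_alt
  rw [pv_A_eq_map]
  have := pv_go_eq_map 1 (number + 1) (le_refl 1) []
  rw [PySem.List.pyRange_one_eq_nil (le_refl 1)] at this
  simpa using this.symm
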